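-- pv_equiv track=rewrite | github.com/NaveenKumar-G-AI/PrepVista-AI | app/services/evaluator.py | _is_valid_career_strength
-- ===== SOURCE A (Python) =====
-- def _safe_text(value) -> str:
--     if value is None:
--         return ""
--     if isinstance(value, str):
--         return value.strip()
--     return str(value).strip()
--
-- def _is_valid_career_strength(text: str) -> bool:
--     normalized = _safe_text(text).lower()
--     if not normalized:
--         return False
--     negative_terms = (
--         "nothing",
--         "lack",
--         "lacks",
--         "weak",
--         "unclear",
--         "failed",
--         "missing",
--         "no answer",
--         "not enough",
--         "too short",
--         "too shallow",
--         "did not",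
--         "didn't",
--         "needs",
--     )
--     return not any(term in normalized for term in negative_terms)
-- ===== SOURCE B (Python) =====
-- def _safe_text(value) -> str:
--     if value is None:
--         return ""
--     if isinstance(value, str):
--         return value.strip()
--     return str(value).strip()
--
-- # same 14 terms, stored as one alternation pattern
-- _PATTERN = "nothing|lack|lacks|weak|unclear|failed|missing|no answer|not enough|too short|too shallow|did not|didn't|needs"
--
-- def _is_valid_career_strength(text: str) -> bool:
--     normalized = _safe_text(text).lower()
--     if not normalized:
--         return False
--     # index the terms once by their first character ...
--     buckets = {}
--     for term in _PATTERN.split("|"):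
--         c = term[0]
--         buckets[c] = buckets.get(c, []) + [term]
--     # ... then sweep the text once, testing only the terms whose first
--     # character matches the current position
--     for i, ch in enumerate(normalized):
--         for term in buckets.get(ch, []):
--             if normalized.startswith(term, i):
--                 return False
--     return True
-- ===== Notes on version B (the rewrite author's own statement) =====
-- stated objective: alternative
-- what changed: Replaces A's fourteen independent full-text substring scans (one per negative term) with a dict built once that indexes the terms by first character, then a single sweep over the text testing only the bucket matching the current character at each position.
import Mathlib
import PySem

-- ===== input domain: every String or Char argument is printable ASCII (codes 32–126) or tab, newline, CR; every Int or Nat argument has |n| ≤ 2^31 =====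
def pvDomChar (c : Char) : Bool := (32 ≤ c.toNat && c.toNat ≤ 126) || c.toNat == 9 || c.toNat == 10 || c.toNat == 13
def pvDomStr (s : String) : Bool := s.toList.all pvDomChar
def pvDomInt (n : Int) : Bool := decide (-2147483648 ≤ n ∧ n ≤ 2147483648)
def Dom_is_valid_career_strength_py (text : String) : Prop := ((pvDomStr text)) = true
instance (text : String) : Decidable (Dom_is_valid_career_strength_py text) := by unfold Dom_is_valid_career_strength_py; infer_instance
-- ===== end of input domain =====

-- B indexes the fourteen terms once in a dict keyed by first character, then sweeps the text once testing only the matching bucket at each position; alternative decomposition, same cost.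


-- ===== PORT A =====
-- the tuple literal of negative terms from A's body
def negTermsA : List (List Char) :=
  ["nothing".toList, "lack".toList, "lacks".toList, "weak".toList, "unclear".toList,
   "failed".toList, "missing".toList, "no answer".toList, "not enough".toList,
   "too short".toList, "too shallow".toList, "did not".toList, "didn't".toList, "needs".toList]

def is_valid_career_strength_py (text : String) : Bool :=
  let normalized := PySem.Chars.lower (PySem.Chars.strip text.toList)
  if normalized.isEmpty then false
  else ! negTermsA.any (fun term => PySem.Chars.isIn term normalized)

-- ===== PORT B =====
-- Source B's _PATTERN constant (the same 14 terms joined by '|')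
def negPattern : List Char :=
  "nothing|lack|lacks|weak|unclear|failed|missing|no answer|not enough|too short|too shallow|did not|didn't|needs".toList

-- Source B's dict-building loop: buckets[term[0]] = buckets.get(term[0], []) + [term]
-- (term[0] is total here: every piece of the '|'-split is nonempty)
def buildBuckets (terms : List (List Char)) : PySem.Dict Char (List (List Char)) :=
  terms.foldl
    (fun d t =>
      let c := (PySem.List.pyGet? t 0).getD ' '
      d.modify c [] (· ++ [t]))
    PySem.Dict.empty

-- Source B's sweep (for i, ch in enumerate): recursion over the suffix at i; normalized.startswith(term, i)
-- is exactly startswith on that suffix, c its first character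
def scanB (buckets : PySem.Dict Char (List (List Char))) : List Char → Bool
  | [] => true
  | c :: rest =>
      if (buckets.getD c []).any (fun t => PySem.Chars.startswith (c :: rest) t) then false
      else scanB buckets rest

def is_valid_career_strength_py_alt (text : String) : Bool :=
  let normalized := PySem.Chars.lower (PySem.Chars.strip text.toList)
  if normalized.isEmpty then false
  else scanB (buildBuckets (PySem.Chars.splitOn negPattern "|".toList)) normalized

-- ===== PRECONDITION & SPEC =====
def Spec_is_valid_career_strength_py (text : String) (out : Bool) : Prop := out = is_valid_career_strength_py_alt text
instance (text : String) (out : Bool) : Decidable (Spec_is_valid_career_strength_py text out) := by unfold Spec_is_valid_career_strength_py; infer_instance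

-- ===== CLAIM (what is proved, stated in full; the proofs are below) =====
def Claim_equal_is_valid_career_strength_py : Prop := ∀ (text : String), Dom_is_valid_career_strength_py text → Spec_is_valid_career_strength_py text (is_valid_career_strength_py text)

-- ===== LEMMAS AND PROOFS =====

-- splitting the pattern yields exactly A's term tuple
lemma split_pattern_eq : PySem.Chars.splitOn negPattern "|".toList = negTermsA := by decide

-- a bucket holds exactly the terms whose first character is its key, in order
lemma buckets_getD (terms : List (List Char)) (c : Char) :
    (buildBuckets terms).getD c []
      = terms.filter (fun t => (PySem.List.pyGet? t 0).getD ' ' == c) := by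
  unfold buildBuckets
  have h := PySem.Dict.getD_foldl_modify_append
    (l := terms.map (fun t => ((PySem.List.pyGet? t 0).getD ' ', t)))
    (d := PySem.Dict.empty) (c := c)
  rw [List.foldl_map] at h
  rw [h]
  simp [List.filter_map, Function.comp_def]

-- containment in c::rest is: starts at the head, or contained in the tail
lemma isIn_cons (t : List Char) (c : Char) (rest : List Char) :
    PySem.Chars.isIn t (c :: rest)
      = (PySem.Chars.startswith (c :: rest) t || PySem.Chars.isIn t rest) := by
  apply Bool.eq_iff_iff.mpr
  simp only [Bool.or_eq_true, PySem.Chars.isIn_iff_infix, PySem.Chars.startswith_iff]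
  exact List.infix_cons_iff

-- Bool.any distributes over ||
lemma any_or_distrib {a : Type} (l : List a) (p q : a → Bool) :
    (l.any fun x => p x || q x) = (l.any p || l.any q) := by
  induction l with
  | nil => rfl
  | cons x l ih => simp [List.any_cons, ih, Bool.or_assoc, Bool.or_left_comm]

-- a term whose first character differs from c never starts at c
lemma startswith_first_char_ne (c : Char) (rest t : List Char) (ht : t ≠ [])
    (h : (PySem.List.pyGet? t 0).getD ' ' ≠ c) :
    PySem.Chars.startswith (c :: rest) t = false := by
  cases t with
  | nil => exact absurd rfl ht
  | cons a ts =>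
    apply Bool.not_eq_true _ |>.mp
    intro hs
    rcases (PySem.Chars.startswith_iff _ _).mp hs with ⟨u, hu⟩
    cases hu
    simp [PySem.List.pyGet?, PySem.List.pyIdx?] at h

-- testing only the first-character bucket is the same as testing every term
lemma bucket_any_eq (terms : List (List Char)) (hne : ∀ t ∈ terms, t ≠ [])
    (c : Char) (rest : List Char) :
    ((terms.filter (fun t => (PySem.List.pyGet? t 0).getD ' ' == c)).any
        (fun t => PySem.Chars.startswith (c :: rest) t))
      = terms.any (fun t => PySem.Chars.startswith (c :: rest) t) := by
  induction terms with
  | nil => rfl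
  | cons t ts ih =>
    have hts : ∀ u ∈ ts, u ≠ [] := fun u hu => hne u (List.mem_cons_of_mem _ hu)
    by_cases hc : (PySem.List.pyGet? t 0).getD ' ' = c
    · simp [hc, List.any_cons, ih hts]
    · have hf := startswith_first_char_ne c rest t (hne t (List.mem_cons_self)) hc
      simp [hc, List.any_cons, hf, ih hts]

-- the sweep computes "no term is contained in the string"
lemma scanB_eq (terms : List (List Char)) (hne : ∀ t ∈ terms, t ≠ []) (s : List Char) :
    scanB (buildBuckets terms) s = ! terms.any (fun t => PySem.Chars.isIn t s) := by
  induction s with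
  | nil =>
    simp only [scanB]
    have hz : terms.any (fun t => PySem.Chars.isIn t []) = false := by
      rw [List.any_eq_false]
      intro t ht hc
      exact hne t ht (List.infix_nil.mp ((PySem.Chars.isIn_iff_infix t []).mp hc))
    rw [hz]
    rfl
  | cons c rest ih =>
    simp only [scanB, buckets_getD, bucket_any_eq terms hne c rest]
    by_cases h : terms.any (fun t => PySem.Chars.startswith (c :: rest) t) = true
    · simp only [h, if_true]
      have : terms.any (fun t => PySem.Chars.isIn t (c :: rest)) = true := by
        rcases List.any_eq_true.mp h with ⟨t, ht, hst⟩
        exact List.any_eq_true.mpr ⟨t, ht, by rw [isIn_cons, hst]; rfl⟩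
      rw [this]; rfl
    · simp only [Bool.not_eq_true] at h
      have hstep : (terms.any fun t => PySem.Chars.isIn t (c :: rest))
           = (terms.any fun t => PySem.Chars.isIn t rest) := by
        calc (terms.any fun t => PySem.Chars.isIn t (c :: rest))
            = (terms.any fun t => PySem.Chars.startswith (c :: rest) t
                 || PySem.Chars.isIn t rest) := by
              simp only [isIn_cons]
          _ = _ := by rw [any_or_distrib, h, Bool.false_or]
      simp [h, ih, hstep]

-- no term is empty
lemma negTermsA_ne_nil : ∀ t ∈ negTermsA, t ≠ [] := by decide

-- ===== VERDICT (by name: the statement is the Claim_ definition above) =====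
theorem is_valid_career_strength_py_spec : Claim_equal_is_valid_career_strength_py := by
  intro text _
  unfold Spec_is_valid_career_strength_py is_valid_career_strength_py is_valid_career_strength_py_alt
  simp only [split_pattern_eq]
  split_ifs
  · rfl
  · exact (scanB_eq negTermsA negTermsA_ne_nil _).symm
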